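-- pv_equiv track=rewrite | github.com/tejasjbhor/poc | utils/execution_events.py | _build_graph_path
-- ===== SOURCE A (Python) =====
-- ExecutionStack = tuple[dict[str, str], ...]
--
-- def _build_graph_path(stack: ExecutionStack, current_graph_name: str | None = None) -> list[str]:
--     graph_path: list[str] = []
--
--     for frame in stack:
--         graph_name = frame["graph_name"]
--         if not graph_path or graph_path[-1] != graph_name:
--             graph_path.append(graph_name)
--
--     if current_graph_name and (not graph_path or graph_path[-1] != current_graph_name):
--         graph_path.append(current_graph_name)
--
--     return graph_path
-- ===== SOURCE B (Python) =====
-- def _build_graph_path(stack, current_graph_name=None):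
--     names = [frame["graph_name"] for frame in stack]
--     if current_graph_name:
--         names.append(current_graph_name)
--     return names[:1] + [n for prev, n in zip(names, names[1:]) if n != prev]
-- ===== Notes on version B (the rewrite author's own statement) =====
-- stated objective: idiomatic
-- what changed: B first builds the flat list of graph names (stack names plus the truthy current name) and then collapses adjacent duplicates in a second phase by zipping the list with its own tail, instead of A's single interleaved loop that compares each name against the last element of the output being built.
-- outside the precondition, e.g. on _build_graph_path(({},), None): A raises KeyError, B raises KeyError
import Mathlib
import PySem

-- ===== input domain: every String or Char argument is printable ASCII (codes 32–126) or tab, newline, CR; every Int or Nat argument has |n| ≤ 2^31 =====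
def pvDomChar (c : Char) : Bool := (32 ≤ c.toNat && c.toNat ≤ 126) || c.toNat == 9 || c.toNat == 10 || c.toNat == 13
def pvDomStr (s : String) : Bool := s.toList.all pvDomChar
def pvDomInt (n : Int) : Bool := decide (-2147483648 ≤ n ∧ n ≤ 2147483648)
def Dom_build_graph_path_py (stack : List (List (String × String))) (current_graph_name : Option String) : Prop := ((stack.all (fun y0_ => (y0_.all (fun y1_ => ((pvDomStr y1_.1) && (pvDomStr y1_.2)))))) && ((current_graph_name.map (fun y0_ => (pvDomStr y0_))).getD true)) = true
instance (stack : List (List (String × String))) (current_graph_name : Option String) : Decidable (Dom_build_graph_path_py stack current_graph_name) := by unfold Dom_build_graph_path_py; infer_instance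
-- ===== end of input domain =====

-- B builds the flat name list first and collapses adjacent duplicates in a separate zip-with-tail pass (idiomatic two-phase form); A interleaves the comparison against the output's last element in one loop.


-- ===== PORT A =====
-- frame["graph_name"]: first-match lookup; Pre_ guarantees the key is present, so the
-- getD "" default is never taken on admitted inputs (KeyError inputs are outside Pre_).
def pvGetGraphName (frame : List (String × String)) : String :=
  (frame.lookup "graph_name").getD ""

def build_graph_path_py (stack : List (List (String × String))) (current_graph_name : Option String) : List String :=
  let graph_path :=
    stack.foldl (fun graph_path frame =>
      let graph_name := pvGetGraphName frame
      if graph_path = [] ∨ graph_path.getLast? ≠ some graph_name then graph_path ++ [graph_name]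
      else graph_path) []
  match current_graph_name with
  | none => graph_path
  | some s =>
      -- `if current_graph_name and (...)`: None/"" are falsy
      if s ≠ "" ∧ (graph_path = [] ∨ graph_path.getLast? ≠ some s) then graph_path ++ [s]
      else graph_path

-- ===== PORT B =====
def build_graph_path_py_alt (stack : List (List (String × String))) (current_graph_name : Option String) : List String :=
  let names0 := stack.map pvGetGraphName
  -- `if current_graph_name: names.append(current_graph_name)`
  let names :=
    match current_graph_name with
    | none => names0
    | some s => if s ≠ "" then names0 ++ [s] else names0
  -- names[:1] + [n for prev, n in zip(names, names[1:]) if n != prev]   (names[1:] = drop 1, exact)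
  names.take 1 ++ (names.zip (names.drop 1)).filterMap (fun p => if p.2 ≠ p.1 then some p.2 else none)

-- ===== PRECONDITION & SPEC =====
-- Pre_ excludes exactly the inputs where A raises KeyError: some frame lacks the "graph_name" key.
def Pre_build_graph_path_py (stack : List (List (String × String))) (current_graph_name : Option String) : Prop :=
  ∀ frame ∈ stack, (frame.lookup "graph_name").isSome = true
instance (stack : List (List (String × String))) (current_graph_name : Option String) : Decidable (Pre_build_graph_path_py stack current_graph_name) := by unfold Pre_build_graph_path_py; infer_instance

def pvWitness_build_graph_path_py : (List (List (String × String))) × Option String :=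
  ([[("graph_name", "a")], [("graph_name", "a")], [("graph_name", "b")]], some "c")

def Spec_build_graph_path_py (stack : List (List (String × String))) (current_graph_name : Option String) (out : List String) : Prop := out = build_graph_path_py_alt stack current_graph_name
instance (stack : List (List (String × String))) (current_graph_name : Option String) (out : List String) : Decidable (Spec_build_graph_path_py stack current_graph_name out) := by unfold Spec_build_graph_path_py; infer_instance

-- ===== CLAIM (what is proved, stated in full; the proofs are below) =====
def Claim_equal_build_graph_path_py : Prop := ∀ (stack : List (List (String × String))) (current_graph_name : Option String), Dom_build_graph_path_py stack current_graph_name → Pre_build_graph_path_py stack current_graph_name → Spec_build_graph_path_py stack current_graph_name (build_graph_path_py stack current_graph_name)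

-- ===== LEMMAS AND PROOFS =====

-- A's loop body, abstracted over the already-looked-up name.
def pvStep (gp : List String) (n : String) : List String :=
  if gp = [] ∨ gp.getLast? ≠ some n then gp ++ [n] else gp

-- Tail of the collapsed list of x :: ns.
def pvRest : String → List String → List String
  | _, [] => []
  | x, n :: t => if n = x then pvRest n t else n :: pvRest n t

theorem pvZip_eq_rest (ns : List String) (x : String) :
    ((x :: ns).zip ns).filterMap (fun p => if p.2 ≠ p.1 then some p.2 else none) = pvRest x ns := by
  induction ns generalizing x with
  | nil => rfl
  | cons n t ih =>
      have hz : ((x :: n :: t).zip (n :: t)) = (x, n) :: ((n :: t).zip t) := rfl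
      rw [hz, List.filterMap_cons, ih n]
      by_cases h : n = x
      · simp [pvRest, h]
      · simp [pvRest, h]

theorem pvFoldl_step (ns : List String) (acc : List String) (x : String)
    (h : acc.getLast? = some x) :
    ns.foldl pvStep acc = acc ++ pvRest x ns := by
  induction ns generalizing acc x with
  | nil => simp [pvRest]
  | cons n t ih =>
      have hne : acc ≠ [] := by intro he; simp [he] at h
      simp only [List.foldl_cons, pvRest]
      by_cases hx : n = x
      · have hstep : pvStep acc n = acc := by simp [pvStep, hne, h, hx]
        rw [hstep, ih acc x h, hx]
        simp
      · have hstep : pvStep acc n = acc ++ [n] := by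
          simp [pvStep, h]
          exact fun _ he => hx he.symm
        rw [hstep, ih (acc ++ [n]) n (by simp)]
        simp [hx]

theorem pvFoldl_eq_collapse (l : List String) :
    l.foldl pvStep [] =
      l.take 1 ++ (l.zip (l.drop 1)).filterMap (fun p => if p.2 ≠ p.1 then some p.2 else none) := by
  cases l with
  | nil => rfl
  | cons x ns =>
      have h1 : pvStep [] x = [x] := by simp [pvStep]
      simp only [List.foldl_cons, h1, List.take, List.drop]
      rw [pvFoldl_step ns [x] x (by simp), pvZip_eq_rest]

-- ===== VERDICT (by name: the statement is the Claim_ definition above) =====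
theorem build_graph_path_py_spec : Claim_equal_build_graph_path_py := by
  intro stack c _ _
  unfold Spec_build_graph_path_py build_graph_path_py build_graph_path_py_alt
  have hloop : stack.foldl (fun graph_path frame =>
      let graph_name := pvGetGraphName frame
      if graph_path = [] ∨ graph_path.getLast? ≠ some graph_name then graph_path ++ [graph_name]
      else graph_path) [] = (stack.map pvGetGraphName).foldl pvStep [] := by
    rw [List.foldl_map]; rfl
  simp only [hloop]
  cases c with
  | none => exact pvFoldl_eq_collapse _
  | some s =>
      by_cases hs : s = ""
      · simp only [hs]
        simpa using pvFoldl_eq_collapse (stack.map pvGetGraphName)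
      · have : (if s ≠ "" ∧ ((stack.map pvGetGraphName).foldl pvStep [] = [] ∨
            ((stack.map pvGetGraphName).foldl pvStep []).getLast? ≠ some s)
            then (stack.map pvGetGraphName).foldl pvStep [] ++ [s]
            else (stack.map pvGetGraphName).foldl pvStep []) =
            (stack.map pvGetGraphName ++ [s]).foldl pvStep [] := by
          rw [List.foldl_append]
          simp [pvStep, hs]
        have h2 := pvFoldl_eq_collapse (stack.map pvGetGraphName ++ [s])
        rw [← this] at h2
        simpa [hs] using h2
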